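-- pv_equiv track=rewrite | github.com/agisota/diffs | docdiffops_mvp/docdiffops/forensic_correlations.py | compute_correlation_matrix
-- ===== SOURCE A (Python) =====
-- from collections import defaultdict
-- from typing import Any
--
-- def compute_correlation_matrix(
--     themes: list[dict[str, Any]],
--     docs: list[dict[str, Any]],
--     theme_doc_links: list[dict[str, Any]],
-- ) -> dict[str, dict[str, int]]:
--     """Build a theme × document coverage count matrix.
--
--     Each cell ``matrix[theme_id][doc_id]`` records how many theme-doc link
--     entries (from ``theme_doc_links``) connect that theme to that document.
--     Links whose status is ``"not_comparable"`` are excluded.  Themes with no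
--     links receive all-zero rows so coverage gaps are preserved.
--
--     Args:
--         themes: List of theme dicts, each with at least an ``"id"`` key.
--         docs: List of document dicts, each with at least an ``"id"`` key.
--         theme_doc_links: List of dicts with keys ``"theme_id"``, ``"doc_id"``,
--             and optionally ``"status"``.
--
--     Returns:
--         Nested dict ``{theme_id: {doc_id: count, ...}, ...}``.  Order of
--         outer keys follows ``themes`` list order; order of inner keys follows
--         ``docs`` list order.
--     """
--     if not themes and not docs:
--         return {}
--
--     doc_ids: list[str] = [str(d.get("id", "")) for d in docs]
--     theme_ids: list[str] = [str(t.get("id", "")) for t in themes]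
--
--     # Count non-not_comparable links per (theme_id, doc_id).
--     counts: dict[tuple[str, str], int] = defaultdict(int)
--     for link in theme_doc_links:
--         tid = str(link.get("theme_id", "")).strip()
--         did = str(link.get("doc_id", "")).strip()
--         status = str(link.get("status", "")).strip()
--         if tid and did and status != "not_comparable":
--             counts[(tid, did)] += 1
--
--     matrix: dict[str, dict[str, int]] = {}
--     for tid in theme_ids:
--         row: dict[str, int] = {}
--         for did in doc_ids:
--             row[did] = counts.get((tid, did), 0)
--         matrix[tid] = row
--     return matrix
-- ===== SOURCE B (Python) =====
-- def compute_correlation_matrix(themes, docs, theme_doc_links):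
--     """Scatter instead of gather: build the dense all-zero matrix first, then a
--     single pass over the links increments matching cells in place (no counter)."""
--     matrix = {
--         str(t.get("id", "")): {str(d.get("id", "")): 0 for d in docs}
--         for t in themes
--     }
--     for link in theme_doc_links:
--         tid = str(link.get("theme_id", "")).strip()
--         did = str(link.get("doc_id", "")).strip()
--         status = str(link.get("status", "")).strip()
--         if tid and did and status != "not_comparable":
--             row = matrix.get(tid)
--             if row is not None and did in row:
--                 row[did] += 1
--     return matrix
-- ===== Notes on version B (the rewrite author's own statement) =====
-- stated objective: alternative
-- what changed: Replaces A's gather pipeline (filter links into a (theme,doc) counter dict, then read every cell out of it) by the reverse scatter decomposition: build the dense all-zero theme x doc matrix first, then one pass over the links increments the matching cell in place; the counter dict disappears.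
import Mathlib
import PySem

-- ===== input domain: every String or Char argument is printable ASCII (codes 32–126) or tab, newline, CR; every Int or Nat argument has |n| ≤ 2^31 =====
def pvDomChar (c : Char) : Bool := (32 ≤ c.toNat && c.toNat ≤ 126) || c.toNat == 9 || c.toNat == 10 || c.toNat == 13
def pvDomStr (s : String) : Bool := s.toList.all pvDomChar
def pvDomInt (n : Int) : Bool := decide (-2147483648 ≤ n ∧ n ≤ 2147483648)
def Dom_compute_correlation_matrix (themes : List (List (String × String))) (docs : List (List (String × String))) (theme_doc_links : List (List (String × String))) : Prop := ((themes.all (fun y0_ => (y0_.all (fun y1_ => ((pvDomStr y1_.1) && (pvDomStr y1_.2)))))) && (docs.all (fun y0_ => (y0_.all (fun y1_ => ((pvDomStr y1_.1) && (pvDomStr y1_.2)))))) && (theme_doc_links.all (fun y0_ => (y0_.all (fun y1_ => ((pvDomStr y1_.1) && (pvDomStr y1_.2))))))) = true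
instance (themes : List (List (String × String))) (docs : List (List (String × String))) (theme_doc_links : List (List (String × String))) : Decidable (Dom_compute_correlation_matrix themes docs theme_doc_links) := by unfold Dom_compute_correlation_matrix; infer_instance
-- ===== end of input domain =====

-- B replaces A's gather pipeline (counter dict of link pairs, then read every cell)
-- by the reverse scatter decomposition (dense zero matrix first, then one pass over the
-- links incrementing matching cells): an alternative decomposition, not claimed faster.

-- `d.get(k, "")` on an association-list dict (first match), shared by both ports.
def pvGetS (d : List (String × String)) (k : String) : String := (d.lookup k).getD ""

-- ===== PORT A =====
def compute_correlation_matrix (themes : List (List (String × String))) (docs : List (List (String × String))) (theme_doc_links : List (List (String × String))) : List (String × List (String × Int)) :=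
  if themes = [] ∧ docs = [] then []
  else
    let doc_ids : List String := docs.map (fun d => pvGetS d "id")
    let theme_ids : List String := themes.map (fun t => pvGetS t "id")
    let counts : PySem.Dict (String × String) Int :=
      theme_doc_links.foldl (fun c link =>
        let tid := PySem.Str.strip (pvGetS link "theme_id")
        let did := PySem.Str.strip (pvGetS link "doc_id")
        let status := PySem.Str.strip (pvGetS link "status")
        if tid ≠ "" ∧ did ≠ "" ∧ status ≠ "not_comparable" then
          c.modify (tid, did) 0 (· + 1)
        else c) PySem.Dict.empty
    let matrix : PySem.Dict String (PySem.Dict String Int) :=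
      theme_ids.foldl (fun m tid =>
        let row : PySem.Dict String Int :=
          doc_ids.foldl (fun r did => r.insert did (counts.getD (tid, did) 0)) PySem.Dict.empty
        m.insert tid row) PySem.Dict.empty
    matrix.items.map (fun p => (p.1, p.2.items))

-- ===== PORT B =====
def compute_correlation_matrix_alt (themes : List (List (String × String))) (docs : List (List (String × String))) (theme_doc_links : List (List (String × String))) : List (String × List (String × Int)) :=
  -- the dense all-zero matrix: one row per theme id, one zero cell per doc id
  let matrix0 : PySem.Dict String (PySem.Dict String Int) :=
    themes.foldl (fun m t =>
      m.insert (pvGetS t "id")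
        (docs.foldl (fun r d => r.insert (pvGetS d "id") 0) PySem.Dict.empty)) PySem.Dict.empty
  -- single pass over the links: scatter increments into existing cells
  let matrix := theme_doc_links.foldl (fun m link =>
    let tid := PySem.Str.strip (pvGetS link "theme_id")
    let did := PySem.Str.strip (pvGetS link "doc_id")
    let status := PySem.Str.strip (pvGetS link "status")
    if tid ≠ "" ∧ did ≠ "" ∧ status ≠ "not_comparable" then
      match m.get? tid with
      | some row => if row.contains did then m.insert tid (row.insert did (row.getD did 0 + 1)) else m
      | none => m
    else m) matrix0
  matrix.items.map (fun p => (p.1, p.2.items))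

-- ===== PRECONDITION & SPEC =====
def Spec_compute_correlation_matrix (themes : List (List (String × String))) (docs : List (List (String × String))) (theme_doc_links : List (List (String × String))) (out : List (String × List (String × Int))) : Prop := out = compute_correlation_matrix_alt themes docs theme_doc_links
instance (themes : List (List (String × String))) (docs : List (List (String × String))) (theme_doc_links : List (List (String × String))) (out : List (String × List (String × Int))) : Decidable (Spec_compute_correlation_matrix themes docs theme_doc_links out) := by unfold Spec_compute_correlation_matrix; infer_instance

-- ===== CLAIM (what is proved, stated in full; the proofs are below) =====
def Claim_equal_compute_correlation_matrix : Prop := ∀ (themes : List (List (String × String))) (docs : List (List (String × String))) (theme_doc_links : List (List (String × String))), Dom_compute_correlation_matrix themes docs theme_doc_links → Spec_compute_correlation_matrix themes docs theme_doc_links (compute_correlation_matrix themes docs theme_doc_links)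

-- ===== LEMMAS AND PROOFS =====

-- the qualifying stripped (theme_id, doc_id) pairs of the links, in order
def ccm_good (theme_doc_links : List (List (String × String))) : List (String × String) :=
  theme_doc_links.filterMap (fun link =>
    if PySem.Str.strip (pvGetS link "theme_id") ≠ "" ∧ PySem.Str.strip (pvGetS link "doc_id") ≠ "" ∧
        PySem.Str.strip (pvGetS link "status") ≠ "not_comparable" then
      some (PySem.Str.strip (pvGetS link "theme_id"), PySem.Str.strip (pvGetS link "doc_id"))
    else none)

-- a row keyed by doc ids with values given by a function of the key
def ccm_row {ν : Type} (D : List String) (v : String → ν) : PySem.Dict String ν :=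
  D.foldl (fun r did => r.insert did (v did)) PySem.Dict.empty

-- the dense matrix: rows over T, cells over D, values f
def ccm_dense (T D : List String) (f : String → String → Int) : PySem.Dict String (PySem.Dict String Int) :=
  T.foldl (fun m tid => m.insert tid (ccm_row D (f tid))) PySem.Dict.empty

-- B's per-link scatter step on a qualifying pair
def ccm_bump (m : PySem.Dict String (PySem.Dict String Int)) (x : String × String) : PySem.Dict String (PySem.Dict String Int) :=
  match m.get? x.1 with
  | some row => if row.contains x.2 then m.insert x.1 (row.insert x.2 (row.getD x.2 0 + 1)) else m
  | none => m

-- get? of a key-determined insert loop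
lemma ccm_get?_row {ν : Type} (l : List String) (v : String → ν) (m0 : PySem.Dict String ν) (k : String) :
    (l.foldl (fun m x => m.insert x (v x)) m0).get? k = if k ∈ l then some (v k) else m0.get? k := by
  induction l generalizing m0 with
  | nil => simp
  | cons x l ih =>
    simp only [List.foldl_cons, ih, List.mem_cons]
    by_cases hk : k ∈ l
    · simp [hk]
    · by_cases hx : k = x
      · simp [hx, PySem.Dict.get?_insert_self]
      · simp [hk, hx, PySem.Dict.get?_insert_of_ne m0 (v x) hx]

-- items of a key-determined insert loop from empty
lemma ccm_items_row {ν : Type} (l : List String) (v : String → ν) :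
    (l.foldl (fun m x => m.insert x (v x)) PySem.Dict.empty).items
      = (PySem.Set.ofList l).map (fun k => (k, v k)) := by
  have hkeys : (l.foldl (fun m x => m.insert x (v x)) PySem.Dict.empty).keys
      = PySem.Set.ofList l := by
    simpa using PySem.Dict.keys_foldl_insert l (fun _ x => v x) PySem.Dict.empty
  have hnd : (l.foldl (fun m x => m.insert x (v x)) PySem.Dict.empty).keys.Nodup := by
    rw [hkeys]; exact PySem.Set.nodup_ofList l
  rcases l with _ | ⟨x, l⟩
  · rfl
  · rw [PySem.Dict.items_eq_map_keys _ hnd (v x), hkeys]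
    refine List.map_congr_left (fun k hk => ?_)
    have hkl : k ∈ (x :: l) := (PySem.Set.mem_ofList _ _).mp hk
    rw [PySem.Dict.getD_eq_get?_getD, ccm_get?_row]
    simp [hkl]

-- inserting at a key already produced by a key-determined insert loop
lemma ccm_insert_row {ν : Type} (l : List String) (v : String → ν) (k0 : String) (hk : k0 ∈ l) (w : ν) :
    (l.foldl (fun m x => m.insert x (v x)) PySem.Dict.empty).insert k0 w
      = l.foldl (fun m x => m.insert x (if x = k0 then w else v x)) PySem.Dict.empty := by
  apply PySem.Dict.ext
  have hc : (l.foldl (fun m x => m.insert x (v x)) PySem.Dict.empty).contains k0 = true := by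
    rw [PySem.Dict.contains_eq_isSome_get?, ccm_get?_row]
    simp [hk]
  rw [PySem.Dict.items_insert_of_contains _ w hc, ccm_items_row, ccm_items_row, List.map_map]
  refine List.map_congr_left (fun k _ => ?_)
  by_cases h : k = k0 <;> simp [h]

-- pointwise congruence for the dense matrix
lemma ccm_dense_congr (T D : List String) (f f' : String → String → Int)
    (h : ∀ t ∈ T, ∀ d ∈ D, f t d = f' t d) : ccm_dense T D f = ccm_dense T D f' := by
  unfold ccm_dense
  refine PySem.List.foldl_congr_mem' T _ _ _ (fun t ht m => ?_)
  have hrow : ccm_row D (f t) = ccm_row D (f' t) := by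
    unfold ccm_row
    exact PySem.List.foldl_congr_mem' D _ _ _ (fun d hd r => by rw [h t ht d hd])
  rw [hrow]

-- one scatter step on a dense matrix bumps exactly one cell (or nothing)
lemma ccm_bump_dense (T D : List String) (f : String → String → Int) (x : String × String) :
    ccm_bump (ccm_dense T D f) x
      = ccm_dense T D (fun t d => if t = x.1 ∧ d = x.2 then f t d + 1 else f t d) := by
  by_cases ht : x.1 ∈ T
  · have hrow : (ccm_dense T D f).get? x.1 = some (ccm_row D (f x.1)) := by
      unfold ccm_dense
      rw [ccm_get?_row]; simp [ht]
    by_cases hd : x.2 ∈ D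
    · have hcont : (ccm_row D (f x.1)).contains x.2 = true := by
        unfold ccm_row
        rw [PySem.Dict.contains_eq_isSome_get?, ccm_get?_row]; simp [hd]
      have hgetD : (ccm_row D (f x.1)).getD x.2 0 = f x.1 x.2 := by
        unfold ccm_row
        rw [PySem.Dict.getD_eq_get?_getD, ccm_get?_row]; simp [hd]
      unfold ccm_bump
      rw [hrow]
      simp only [hcont, if_true, hgetD]
      have hinner : (ccm_row D (f x.1)).insert x.2 (f x.1 x.2 + 1)
          = ccm_row D (fun d => if d = x.2 then f x.1 x.2 + 1 else f x.1 d) := by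
        unfold ccm_row
        exact ccm_insert_row D (f x.1) x.2 hd (f x.1 x.2 + 1)
      rw [hinner]
      unfold ccm_dense
      rw [ccm_insert_row T (fun t => ccm_row D (f t)) x.1 ht]
      refine PySem.List.foldl_congr_mem' T _ _ _ (fun t _ m => ?_)
      congr 1
      by_cases h : t = x.1
      · subst h
        rw [if_pos rfl]
        congr 1
        funext d
        by_cases hdx : d = x.2 <;> simp [hdx]
      · rw [if_neg h]
        congr 1
        funext d
        simp [h]
    · have hcont : (ccm_row D (f x.1)).contains x.2 = false := by
        unfold ccm_row
        rw [PySem.Dict.contains_eq_isSome_get?, ccm_get?_row]; simp [hd]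
      unfold ccm_bump
      rw [hrow]
      simp only [hcont, Bool.false_eq_true, if_false]
      refine ccm_dense_congr T D f _ (fun t _ d hdD => ?_)
      have hne : ¬ (t = x.1 ∧ d = x.2) := fun hh => hd (hh.2 ▸ hdD)
      simp [hne]
  · have hrow : (ccm_dense T D f).get? x.1 = none := by
      unfold ccm_dense
      rw [ccm_get?_row]; simp [ht]
    unfold ccm_bump
    rw [hrow]
    refine ccm_dense_congr T D f _ (fun t htT d _ => ?_)
    have hne : ¬ (t = x.1 ∧ d = x.2) := fun hh => ht (hh.1 ▸ htT)
    simp [hne]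

-- scattering a pair list over a dense matrix adds the pair counts cellwise
lemma ccm_scatter_dense (T D : List String) (g : List (String × String)) (f : String → String → Int) :
    g.foldl ccm_bump (ccm_dense T D f)
      = ccm_dense T D (fun t d => f t d + g.count (t, d)) := by
  induction g generalizing f with
  | nil => simp
  | cons x g ih =>
    obtain ⟨x1, x2⟩ := x
    rw [List.foldl_cons, ccm_bump_dense, ih]
    refine ccm_dense_congr T D _ _ (fun t _ d _ => ?_)
    simp only [List.count_cons]
    by_cases h1 : t = x1 <;> by_cases h2 : d = x2
    · subst h1; subst h2
      simp
      try ring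
    · subst h1
      simp [h2, Ne.symm h2]
    · subst h2
      simp [h1, Ne.symm h1]
    · simp [h1, Ne.symm h1]

-- A's link fold is the Counter of the qualifying pairs
lemma ccm_foldl_counts (links : List (List (String × String))) (c : PySem.Dict (String × String) Int) :
    links.foldl (fun c link =>
        let tid := PySem.Str.strip (pvGetS link "theme_id")
        let did := PySem.Str.strip (pvGetS link "doc_id")
        let status := PySem.Str.strip (pvGetS link "status")
        if tid ≠ "" ∧ did ≠ "" ∧ status ≠ "not_comparable" then
          c.modify (tid, did) 0 (· + 1)
        else c) c
    = (ccm_good links).foldl (fun d x => d.modify x 0 (· + 1)) c := by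
  induction links generalizing c with
  | nil => simp [ccm_good]
  | cons l ls ih =>
    simp only [ccm_good, List.filterMap_cons, List.foldl_cons] at *
    by_cases h : PySem.Str.strip (pvGetS l "theme_id") ≠ "" ∧ PySem.Str.strip (pvGetS l "doc_id") ≠ "" ∧ PySem.Str.strip (pvGetS l "status") ≠ "not_comparable"
    · simp only [if_pos h, List.foldl_cons]
      exact ih _
    · simp only [if_neg h]
      exact ih _

-- B's link fold is the scatter of the qualifying pairs
lemma ccm_foldl_scatter (links : List (List (String × String))) (m : PySem.Dict String (PySem.Dict String Int)) :
    links.foldl (fun m link =>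
        let tid := PySem.Str.strip (pvGetS link "theme_id")
        let did := PySem.Str.strip (pvGetS link "doc_id")
        let status := PySem.Str.strip (pvGetS link "status")
        if tid ≠ "" ∧ did ≠ "" ∧ status ≠ "not_comparable" then
          match m.get? tid with
          | some row => if row.contains did then m.insert tid (row.insert did (row.getD did 0 + 1)) else m
          | none => m
        else m) m
    = (ccm_good links).foldl ccm_bump m := by
  induction links generalizing m with
  | nil => simp [ccm_good]
  | cons l ls ih =>
    simp only [ccm_good, List.filterMap_cons, List.foldl_cons] at *
    by_cases h : PySem.Str.strip (pvGetS l "theme_id") ≠ "" ∧ PySem.Str.strip (pvGetS l "doc_id") ≠ "" ∧ PySem.Str.strip (pvGetS l "status") ≠ "not_comparable"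
    · simp only [if_pos h, List.foldl_cons, ccm_bump]
      exact ih _
    · simp only [if_neg h]
      exact ih _

-- ===== VERDICT (by name: the statement is the Claim_ definition above) =====
theorem compute_correlation_matrix_spec : Claim_equal_compute_correlation_matrix := by
  intro themes docs links _
  unfold Spec_compute_correlation_matrix compute_correlation_matrix compute_correlation_matrix_alt
  simp only [ccm_foldl_scatter, ccm_foldl_counts, ← PySem.Dict.counter_eq_foldl,
    PySem.Dict.getD_counter]
  have hB : (themes.foldl (fun m t =>
        m.insert (pvGetS t "id")
          (docs.foldl (fun r d => r.insert (pvGetS d "id") (0 : Int)) PySem.Dict.empty)) PySem.Dict.empty)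
      = ccm_dense (themes.map fun t => pvGetS t "id") (docs.map fun d => pvGetS d "id") (fun _ _ => 0) := by
    unfold ccm_dense ccm_row
    simp only [List.foldl_map]
  rw [hB, ccm_scatter_dense]
  by_cases h : themes = [] ∧ docs = []
  · obtain ⟨h1, h2⟩ := h
    subst h1; subst h2
    rw [if_pos ⟨rfl, rfl⟩]
    rfl
  · rw [if_neg h]
    have hA : (themes.map fun t => pvGetS t "id").foldl (fun m tid =>
          m.insert tid ((docs.map fun d => pvGetS d "id").foldl
            (fun r did => r.insert did ((List.count (tid, did) (ccm_good links) : Int)))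
            PySem.Dict.empty)) PySem.Dict.empty
        = ccm_dense (themes.map fun t => pvGetS t "id") (docs.map fun d => pvGetS d "id")
            (fun t d => (List.count (t, d) (ccm_good links) : Int)) := rfl
    rw [hA]
    have hcg := ccm_dense_congr (themes.map fun t => pvGetS t "id") (docs.map fun d => pvGetS d "id")
      (fun t d => (List.count (t, d) (ccm_good links) : Int))
      (fun t d => 0 + (List.count (t, d) (ccm_good links) : Int))
      (fun t _ d _ => by ring)
    rw [hcg]
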